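-- pv_equiv track=rewrite | github.com/Elaina10172004/VRP_Agent | local_search/search_utils.py | candidate_insert_positions
-- ===== SOURCE A (Python) =====
-- def candidate_insert_positions(
--     route: list[int],
--     nodes: list[int] | tuple[int, ...],
--     neighbor_lists: list[list[int]] | None,
-- ) -> list[int]:
--     if not route:
--         return [0]
--     if not neighbor_lists:
--         return list(range(len(route) + 1))
--
--     node_set = {int(node) for node in nodes}
--     expanded = set(node_set)
--     for node in node_set:
--         if 0 <= node < len(neighbor_lists):
--             expanded.update(neighbor_lists[node])
--
--     positions = {0, len(route)}
--     for index, customer in enumerate(route):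
--         if customer in expanded:
--             positions.add(index)
--             positions.add(index + 1)
--     return sorted(position for position in positions if 0 <= position <= len(route))
-- ===== SOURCE B (Python) =====
-- def candidate_insert_positions(route, nodes, neighbor_lists):
--     if not route:
--         return [0]
--     if not neighbor_lists:
--         return list(range(len(route) + 1))
--
--     node_set = {int(node) for node in nodes}
--     expanded = set(node_set)
--     for node in node_set:
--         if 0 <= node < len(neighbor_lists):
--             expanded.update(neighbor_lists[node])
--
--     n = len(route)
--     out = []
--     for p in range(n + 1):
--         if p == 0 or p == n or (p < n and route[p] in expanded) or (p > 0 and route[p - 1] in expanded):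
--             out.append(p)
--     return out
-- ===== Notes on version B (the rewrite author's own statement) =====
-- stated objective: simpler
-- what changed: A scatters indices i and i+1 into an unordered position set and then filters and sorts it; B makes one left-to-right pass over range(len(route)+1), appending each position that is 0, len(route), or adjacent to an expanded node, so the result comes out sorted and deduplicated with no set-of-positions and no sort.
import Mathlib
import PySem

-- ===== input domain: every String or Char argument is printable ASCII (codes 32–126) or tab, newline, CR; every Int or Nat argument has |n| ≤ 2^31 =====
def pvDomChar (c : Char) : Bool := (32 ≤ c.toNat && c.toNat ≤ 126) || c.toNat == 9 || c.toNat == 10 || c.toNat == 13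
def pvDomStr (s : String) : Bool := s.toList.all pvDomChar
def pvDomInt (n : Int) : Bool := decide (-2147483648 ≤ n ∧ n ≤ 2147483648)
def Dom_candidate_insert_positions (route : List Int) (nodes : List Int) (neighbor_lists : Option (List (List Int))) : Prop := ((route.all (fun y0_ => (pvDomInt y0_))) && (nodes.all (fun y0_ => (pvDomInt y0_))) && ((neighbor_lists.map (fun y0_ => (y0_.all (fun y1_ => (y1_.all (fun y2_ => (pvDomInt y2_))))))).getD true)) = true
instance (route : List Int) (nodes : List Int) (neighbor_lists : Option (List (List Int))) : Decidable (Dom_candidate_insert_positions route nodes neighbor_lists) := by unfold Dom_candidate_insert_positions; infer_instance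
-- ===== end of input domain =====

-- B replaces A's "scatter positions into a set, filter, sort" by a single left-to-right
-- scan over range(len(route)+1) appending each position adjacent to an expanded node —
-- the output comes out sorted and deduplicated directly (objective: simpler).

-- ===== PORT A =====
-- shared by both ports: the `expanded` set (B's Python keeps A's construction verbatim)
def pvExpanded (nodes : List Int) (nls : List (List Int)) : PySem.Set Int :=
  (PySem.Set.ofList nodes).foldl
    (fun exp node =>
      if 0 ≤ node ∧ node < (nls.length : Int) then
        PySem.Set.update exp (PySem.List.pyGetD nls node [])
      else exp)
    (PySem.Set.ofList nodes)

def candidate_insert_positions (route : List Int) (nodes : List Int) (neighbor_lists : Option (List (List Int))) : List Int :=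
  if route = [] then [0]
  else
    let nls := neighbor_lists.getD []   -- `if not neighbor_lists` is true for None and for []
    if nls = [] then PySem.List.pyRange 0 ((route.length : Int) + 1) 1
    else
      let expanded := pvExpanded nodes nls
      let positions : PySem.Set Int :=
        (PySem.List.enumerate route 0).foldl
          (fun pos ic =>
            if ic.2 ∈ expanded then PySem.Set.add (PySem.Set.add pos ic.1) (ic.1 + 1)
            else pos)
          (PySem.Set.add (PySem.Set.add PySem.Set.empty 0) (route.length : Int))
      PySem.List.sorted
        (positions.filter (fun p => decide (0 ≤ p ∧ p ≤ (route.length : Int))))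
        (fun x => x) false

-- ===== PORT B =====
def candidate_insert_positions_alt (route : List Int) (nodes : List Int) (neighbor_lists : Option (List (List Int))) : List Int :=
  if route = [] then [0]
  else
    let nls := neighbor_lists.getD []
    if nls = [] then PySem.List.pyRange 0 ((route.length : Int) + 1) 1
    else
      let expanded := pvExpanded nodes nls
      let n : Int := (route.length : Int)
      (PySem.List.pyRange 0 (n + 1) 1).foldl
        (fun out p =>
          if p = 0 ∨ p = n ∨ (p < n ∧ PySem.List.pyGetD route p 0 ∈ expanded)
              ∨ (0 < p ∧ PySem.List.pyGetD route (p - 1) 0 ∈ expanded)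
          then out ++ [p] else out)
        []

-- ===== PRECONDITION & SPEC =====
def Spec_candidate_insert_positions (route : List Int) (nodes : List Int) (neighbor_lists : Option (List (List Int))) (out : List Int) : Prop := out = candidate_insert_positions_alt route nodes neighbor_lists
instance (route : List Int) (nodes : List Int) (neighbor_lists : Option (List (List Int))) (out : List Int) : Decidable (Spec_candidate_insert_positions route nodes neighbor_lists out) := by unfold Spec_candidate_insert_positions; infer_instance

-- ===== CLAIM (what is proved, stated in full; the proofs are below) =====
def Claim_equal_candidate_insert_positions : Prop := ∀ (route : List Int) (nodes : List Int) (neighbor_lists : Option (List (List Int))), Dom_candidate_insert_positions route nodes neighbor_lists → Spec_candidate_insert_positions route nodes neighbor_lists (candidate_insert_positions route nodes neighbor_lists)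

-- ===== LEMMAS AND PROOFS =====

-- membership in A's positions fold
theorem mem_posFold (E : PySem.Set Int) (xs : List Int) :
    ∀ (i : Int) (s : List Int) (p : Int),
      p ∈ (PySem.List.enumerate xs i).foldl
            (fun pos ic =>
              if ic.2 ∈ E then PySem.Set.add (PySem.Set.add pos ic.1) (ic.1 + 1) else pos) s
      ↔ p ∈ s ∨ ∃ (k : Nat) (h : k < xs.length), xs[k] ∈ E ∧ (p = i + k ∨ p = i + k + 1) := by
  induction xs with
  | nil => intro i s p; simp [PySem.List.enumerate_nil]
  | cons x t ih =>
    intro i s p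
    rw [PySem.List.enumerate_cons]
    simp only [List.foldl_cons]
    by_cases hx : x ∈ E
    · rw [if_pos hx, ih]
      simp only [PySem.Set.mem_add, List.length_cons]
      constructor
      · rintro (((hs | h0) | h1) | ⟨k, hk, hmem, hp⟩)
        · exact Or.inl hs
        · exact Or.inr ⟨0, by omega, by simpa using hx, by simp [h0]⟩
        · exact Or.inr ⟨0, by omega, by simpa using hx, by simp [h1]⟩
        · exact Or.inr ⟨k + 1, by omega, by simpa using hmem,
            by push_cast; omega⟩
      · rintro (hs | ⟨k, hk, hmem, hp⟩)
        · exact Or.inl (Or.inl (Or.inl hs))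
        · match k, hk, hmem, hp with
          | 0, hk, hmem, hp =>
            simp only [Nat.cast_zero, add_zero] at hp
            rcases hp with hp | hp
            · exact Or.inl (Or.inl (Or.inr hp))
            · exact Or.inl (Or.inr hp)
          | k + 1, hk, hmem, hp =>
            refine Or.inr ⟨k, by omega, by simpa using hmem, ?_⟩
            push_cast at hp ⊢; omega
    · rw [if_neg hx, ih]
      simp only [List.length_cons]
      constructor
      · rintro (hs | ⟨k, hk, hmem, hp⟩)
        · exact Or.inl hs
        · exact Or.inr ⟨k + 1, by omega, by simpa using hmem,
            by push_cast; omega⟩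
      · rintro (hs | ⟨k, hk, hmem, hp⟩)
        · exact Or.inl hs
        · match k, hk, hmem, hp with
          | 0, hk, hmem, hp => exact absurd (by simpa using hmem) hx
          | k + 1, hk, hmem, hp =>
            refine Or.inr ⟨k, by omega, by simpa using hmem, ?_⟩
            push_cast at hp ⊢; omega

theorem nodup_posFold (E : PySem.Set Int) (xs : List Int) :
    ∀ (i : Int) (s : PySem.Set Int), s.Nodup →
      (((PySem.List.enumerate xs i).foldl
          (fun pos ic =>
            if ic.2 ∈ E then PySem.Set.add (PySem.Set.add pos ic.1) (ic.1 + 1) else pos) s) : List Int).Nodup := by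
  induction xs with
  | nil => intro i s hs; simpa [PySem.List.enumerate_nil] using hs
  | cons x t ih =>
    intro i s hs
    rw [PySem.List.enumerate_cons]
    simp only [List.foldl_cons]
    by_cases hx : x ∈ E
    · rw [if_pos hx]
      exact ih _ _ (PySem.Set.nodup_add _ _ (PySem.Set.nodup_add _ _ hs))
    · rw [if_neg hx]; exact ih _ _ hs

-- ===== VERDICT (by name: the statement is the Claim_ definition above) =====
theorem candidate_insert_positions_spec : Claim_equal_candidate_insert_positions := by
  intro route nodes neighbor_lists _
  unfold Spec_candidate_insert_positions candidate_insert_positions candidate_insert_positions_alt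
  by_cases hr : route = []
  · simp [hr]
  rw [if_neg hr, if_neg hr]
  by_cases hn : neighbor_lists.getD [] = []
  · simp [hn]
  simp only [if_neg hn]
  set nls := neighbor_lists.getD [] with hnls
  set E := pvExpanded nodes nls with hE
  set n : Int := (route.length : Int) with hnn
  have hn1 : 1 ≤ n := by
    have : route.length ≠ 0 := fun h => hr (List.eq_nil_of_length_eq_zero h)
    omega
  rw [PySem.List.foldl_append_ite_eq_filter]
  simp only [List.nil_append]
  apply PySem.List.sorted_eq_of_perm_of_pairwise_lt
  · refine (List.perm_ext_iff_of_nodup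
        (List.Nodup.filter _ (PySem.List.nodup_pyRange_one 0 (n+1)))
        (List.Nodup.filter _ (nodup_posFold E route 0 _
          (PySem.Set.nodup_add _ _ (PySem.Set.nodup_add _ _ List.nodup_nil))))).mpr ?_
    intro p
    simp only [List.mem_filter, PySem.List.mem_pyRange_one, decide_eq_true_eq,
      mem_posFold, PySem.Set.mem_add]
    constructor
    · rintro ⟨⟨hp0, hpn⟩, hcond⟩
      refine ⟨?_, hp0, by omega⟩
      rcases hcond with h0 | hN | ⟨hlt, hmem⟩ | ⟨hpos, hmem⟩
      · exact Or.inl (Or.inl (Or.inr h0))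
      · exact Or.inl (Or.inr hN)
      · refine Or.inr ⟨p.toNat, by omega, ?_, Or.inl (by omega)⟩
        have heq : PySem.List.pyGetD route p 0 = route[p.toNat] :=
          PySem.List.pyGetD_eq_getElem route 0 (by omega) (by omega)
        rwa [heq] at hmem
      · refine Or.inr ⟨(p - 1).toNat, by omega, ?_, Or.inr (by omega)⟩
        have heq : PySem.List.pyGetD route (p - 1) 0 = route[(p - 1).toNat] :=
          PySem.List.pyGetD_eq_getElem route 0 (by omega) (by omega)
        rwa [heq] at hmem
    · rintro ⟨hcond, hp0, hpn⟩
      refine ⟨⟨hp0, by omega⟩, ?_⟩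
      rcases hcond with ((h | h0) | hN) | ⟨k, hk, hmem, hp⟩
      · simp at h
      · exact Or.inl h0
      · exact Or.inr (Or.inl hN)
      · rcases hp with hp | hp
        · refine Or.inr (Or.inr (Or.inl ⟨by omega, ?_⟩))
          have heq : PySem.List.pyGetD route p 0 = route[k] := by
            rw [hp]; simp only [zero_add]
            rw [PySem.List.pyGetD_natCast, List.getD_eq_getElem _ _ hk]
          rwa [heq]
        · refine Or.inr (Or.inr (Or.inr ⟨by omega, ?_⟩))
          have heq : PySem.List.pyGetD route (p - 1) 0 = route[k] := by
            have h1 : p - 1 = ((k : Nat) : Int) := by omega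
            rw [h1, PySem.List.pyGetD_natCast, List.getD_eq_getElem _ _ hk]
          rwa [heq]
  · exact List.Pairwise.filter _ (PySem.List.pairwise_lt_pyRange_one 0 (n+1))
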